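-- pv_equiv track=rewrite | github.com/MichalxPZ/PUT-HackerRank-Python | PastTests/MatrixTransformations.py | transform
-- ===== SOURCE A (Python) =====
-- def transform(mat, operations):
--     for operation in operations:
--         if operation.split()[0] == "RR":
--             mat[int(operation.split()[1])].reverse()
--         elif operation.split()[0] == "RC":
--             tab = []
--             col = int(operation.split()[1])
--             for j in range(len(mat)):
--                 tab.append(mat[j][col])
--             tab.reverse()
--             for j in range(len(mat)):
--                 mat[j][col] = tab[j]
--         elif operation == "T":
--             mat2 = []
--             for col in range(len(mat[0])):
--                 tab = []
--                 for row in range(len(mat)):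
--                     tab.append(mat[row][col])
--                 mat2.append(tab)
--             mat = mat2
--     ret = ''
--     for i in mat:
--         for j in i:
--             ret += str(j) + " "
--         ret += "\n"
--
--     return ret
-- ===== SOURCE B (Python) =====
-- def _revcol(m, k):
--     vals = [row[k] for row in m]
--     return [row[:k] + [v] + row[k + 1:] for row, v in zip(m, reversed(vals))]
--
--
-- def transform(mat, operations):
--     m = list(mat)
--     t = False
--     for op in operations:
--         parts = op.split()
--         head = parts[0]
--         if head == "RR":
--             i = int(parts[1])
--             if t:
--                 m = _revcol(m, i % len(m[0]))
--             else:
--                 k = i % len(m)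
--                 m = m[:k] + [m[k][::-1]] + m[k + 1:]
--         elif head == "RC":
--             i = int(parts[1])
--             if m:
--                 if t:
--                     k = i % len(m)
--                     m = m[:k] + [m[k][::-1]] + m[k + 1:]
--                 else:
--                     m = _revcol(m, i % len(m[0]))
--         elif op == "T":
--             t = not t
--     if t:
--         m = [list(z) for z in zip(*m)]
--     return "".join("".join(str(x) + " " for x in row) + "\n" for row in m)
-- ===== Notes on version B (the rewrite author's own statement) =====
-- stated objective: alternative
-- what changed: B keeps a lazy transpose flag (each 'T' is O(1), the transpose is materialised once at the end with zip(*m)) and replaces A's in-place element-index loops by functional whole-row/column rebuilds (slicing, comprehensions, join) without mutating the caller's matrix; the reviewer's per-row/col reversal bits are unsound (row and column reversals do not commute), so reversals stay eager.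
-- outside the precondition, e.g. on transform([[1, 2], [3, 4, 5]], ['RC -1']): A returns '1 5 \n3 4 2 \n', B returns '1 4 \n3 2 5 \n'; on transform([[1], [2, 3]], ['T']): A returns '1 2 \n', B returns '1 2 \n'
import Mathlib
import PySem

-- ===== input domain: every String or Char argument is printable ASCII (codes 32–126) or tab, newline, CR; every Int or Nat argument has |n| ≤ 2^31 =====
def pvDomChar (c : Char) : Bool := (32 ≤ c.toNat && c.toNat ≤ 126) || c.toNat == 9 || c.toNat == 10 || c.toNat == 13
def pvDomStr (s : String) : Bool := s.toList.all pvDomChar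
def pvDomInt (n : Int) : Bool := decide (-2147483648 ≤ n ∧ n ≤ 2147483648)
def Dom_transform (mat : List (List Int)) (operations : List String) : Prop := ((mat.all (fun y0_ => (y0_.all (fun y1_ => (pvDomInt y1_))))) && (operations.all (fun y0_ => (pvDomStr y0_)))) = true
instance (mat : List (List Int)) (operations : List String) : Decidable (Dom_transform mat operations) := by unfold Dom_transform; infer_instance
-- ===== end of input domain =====

-- B replaces A's eager transposes by a lazy transpose flag (one final materialisation) and its
-- in-place index loops by whole-row/column rebuilds; equivalence is about the RETURN value only
-- (Python A mutates `mat` in place, B does not).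

-- ===== PORT A =====
-- the loop body of A: one operation applied to the current matrix.
-- (On inputs outside Pre_ Python A raises; there the pyGetD/pySetD defaults make the port total.)
def aStep (mat : List (List Int)) (op : String) : List (List Int) :=
  let toks := PySem.Str.split₀ op
  if toks.getD 0 "" = "RR" then
    let i := (PySem.Int.ofStr? (toks.getD 1 "")).getD 0
    PySem.List.pySetD mat i ((PySem.List.pyGetD mat i []).reverse)
  else if toks.getD 0 "" = "RC" then
    let col := (PySem.Int.ofStr? (toks.getD 1 "")).getD 0
    let tab := (PySem.List.pyRange 0 mat.length 1).map
      (fun j => PySem.List.pyGetD (PySem.List.pyGetD mat j []) col 0)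
    let tab2 := tab.reverse
    (PySem.List.pyRange 0 mat.length 1).foldl (fun m j =>
      PySem.List.pySetD m j
        (PySem.List.pySetD (PySem.List.pyGetD m j []) col (PySem.List.pyGetD tab2 j 0))) mat
  else if op = "T" then
    (PySem.List.pyRange 0 ((PySem.List.pyGetD mat 0 []).length : Int) 1).map (fun c =>
      (PySem.List.pyRange 0 (mat.length : Int) 1).map (fun r =>
        PySem.List.pyGetD (PySem.List.pyGetD mat r []) c 0))
  else mat

def transform (mat : List (List Int)) (operations : List String) : String :=
  let m := operations.foldl aStep mat
  m.foldl (fun ret row => (row.foldl (fun r x => r ++ PySem.Int.toStr x ++ " ") ret) ++ "\n") ""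

-- ===== PORT B =====
-- helper _revcol of Source B: replace column k by its reverse (row[:k] + [v] + row[k+1:])
def revcol (m : List (List Int)) (k : Nat) : List (List Int) :=
  let vals := m.map (fun row => row.getD k 0)
  (m.zip vals.reverse).map (fun rv => rv.1.take k ++ [rv.2] ++ rv.1.drop (k + 1))

-- Source B's m[:k] + [m[k][::-1]] + m[k+1:]  (k is the already-normalised non-negative index)
def rowrevB (m : List (List Int)) (k : Nat) : List (List Int) :=
  m.take k ++ [(m.getD k []).reverse] ++ m.drop (k + 1)

-- loop body of Source B over the state (m, transposed-flag)
def bStep (st : List (List Int) × Bool) (op : String) : List (List Int) × Bool :=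
  let m := st.1
  let t := st.2
  let toks := PySem.Str.split₀ op
  let head := toks.getD 0 ""
  if head = "RR" then
    let i := (PySem.Int.ofStr? (toks.getD 1 "")).getD 0
    if t then (revcol m (PySem.Int.mod i ((m.headD []).length : Int)).toNat, t)
    else (rowrevB m (PySem.Int.mod i (m.length : Int)).toNat, t)
  else if head = "RC" then
    let i := (PySem.Int.ofStr? (toks.getD 1 "")).getD 0
    if m.isEmpty then st
    else if t then (rowrevB m (PySem.Int.mod i (m.length : Int)).toNat, t)
    else (revcol m (PySem.Int.mod i ((m.headD []).length : Int)).toNat, t)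
  else if op = "T" then (m, !t)
  else st

-- Source B's  [list(z) for z in zip(*m)]  (zip stops at the shortest row)
def zipStar (m : List (List Int)) : List (List Int) :=
  if m.isEmpty || m.any (fun r => r.isEmpty) then []
  else (m.map (fun r => r.headD 0)) :: zipStar (m.map (fun r => r.tail))
termination_by (m.headD []).length
decreasing_by
  cases m with
  | nil => simp at *
  | cons x xs =>
    cases x with
    | nil => simp at *
    | cons a as => simp

def transform_alt (mat : List (List Int)) (operations : List String) : String :=
  let st := operations.foldl bStep (mat, false)
  let m := if st.2 then zipStar st.1 else st.1
  PySem.Str.join "" (m.map (fun row =>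
    PySem.Str.join "" (row.map (fun x => PySem.Int.toStr x ++ " ")) ++ "\n"))

-- ===== PRECONDITION & SPEC =====
-- One operation is safe for a (logical) r×c matrix: it has a token, RR/RC carry an int()-parsable
-- in-range index, and "T" needs a first row to measure.
def preOp (op : String) (r c : Nat) : Bool :=
  let toks := PySem.Str.split₀ op
  !toks.isEmpty &&
  (if toks.getD 0 "" = "RR" then
      match PySem.Int.ofStr? (toks.getD 1 "") with
      | some i => decide (-(r : Int) ≤ i ∧ i < (r : Int))
      | none => false
    else if toks.getD 0 "" = "RC" then
      match PySem.Int.ofStr? (toks.getD 1 "") with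
      | some i => r == 0 || decide (-(c : Int) ≤ i ∧ i < (c : Int))
      | none => false
    else if op = "T" then decide (0 < r)
    else true)

-- each operation checked against the current shape; "T" swaps the shape
def preOps : List String → Nat → Nat → Bool
  | [], _, _ => true
  | op :: rest, r, c => preOp op r c && (if op = "T" then preOps rest c r else preOps rest r c)

def isRect (m : List (List Int)) : Bool := m.all (fun row => row.length == (m.headD []).length)

def hasStruct (ops : List String) : Bool :=
  ops.any (fun op => ((PySem.Str.split₀ op).getD 0 "" == "RC") || op == "T")

-- Pre_ excludes exactly (a) inputs on which A raises (missing/unparsable/out-of-range operation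
-- index, "T" on an empty matrix), and (b) ragged (non-rectangular) matrices when a column or
-- transpose operation occurs, where A's result depends accidentally on the length of row 0.
def Pre_transform (mat : List (List Int)) (operations : List String) : Prop :=
  (if hasStruct operations then isRect mat && preOps operations mat.length (mat.headD []).length
   else operations.all (fun op => preOp op mat.length 0)) = true

instance (mat : List (List Int)) (operations : List String) : Decidable (Pre_transform mat operations) := by
  unfold Pre_transform; infer_instance

def pvWitness_transform : List (List Int) × List String :=
  ([[1, 2], [3, 4]], ["RR 0", "T", "RC -1"])

def Spec_transform (mat : List (List Int)) (operations : List String) (out : String) : Prop :=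
  out = transform_alt mat operations
instance (mat : List (List Int)) (operations : List String) (out : String) : Decidable (Spec_transform mat operations out) := by
  unfold Spec_transform; infer_instance

-- ===== CLAIM (what is proved, stated in full; the proofs are below) =====
def Claim_equal_transform : Prop := ∀ (mat : List (List Int)) (operations : List String), Dom_transform mat operations → Pre_transform mat operations → Spec_transform mat operations (transform mat operations)

-- ===== LEMMAS AND PROOFS =====

-- width of a matrix (length of row 0) and the mathematical transpose both ports converge to
def wid (m : List (List Int)) : Nat := (m.headD []).length

def tr (m : List (List Int)) : List (List Int) :=
  (List.range (wid m)).map (fun j => m.map (fun row => row.getD j 0))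

def Rect (m : List (List Int)) : Prop := ∀ row ∈ m, row.length = wid m

-- the column-reversal spec shared by both sides (revcol with set-normalised rows)
def revcolS (m : List (List Int)) (k : Nat) : List (List Int) :=
  (m.zip ((m.map (fun row => row.getD k 0)).reverse)).map (fun rv => rv.1.set k rv.2)

lemma length_tr (m : List (List Int)) : (tr m).length = wid m := by simp [tr]

lemma getElem_tr (m : List (List Int)) (j : Nat) (h : j < (tr m).length) :
    (tr m)[j] = m.map (fun row => row.getD j 0) := by
  simp [tr] at h ⊢

lemma tr_eq_nil_iff (m : List (List Int)) : tr m = [] ↔ wid m = 0 := by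
  simp [tr, List.map_eq_nil_iff, List.range_eq_nil]

lemma wid_tr (m : List (List Int)) (h : 0 < wid m) : wid (tr m) = m.length := by
  rcases hw : wid m with _ | n
  · omega
  · have htr : tr m = (List.range (n + 1)).map (fun j => m.map (fun row => row.getD j 0)) := by
      rw [tr, hw]
    simp [wid, htr, List.range_succ_eq_map]

lemma rect_tr (m : List (List Int)) : Rect (tr m) := by
  intro row hrow
  obtain ⟨j, hj, hje⟩ := List.mem_iff_getElem.mp hrow
  rw [getElem_tr m j hj] at hje
  have hw : 0 < wid m := by
    by_contra hc
    have : tr m = [] := (tr_eq_nil_iff m).2 (by omega)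
    simp [this] at hrow
  rw [wid_tr m hw, ← hje, List.length_map]

lemma getD_map_lt {α β : Type} [Inhabited β] (m : List α) (f : α → β) (j : Nat) (d : β)
    (h : j < m.length) : (m.map f).getD j d = f m[j] := by
  rw [List.getD_eq_getElem _ d (by simpa using h), List.getElem_map]

lemma map_range_getD_self (xs : List Int) : (List.range xs.length).map (fun k => xs.getD k 0) = xs := by
  apply List.ext_getElem (by simp)
  intro i h1 h2
  simp only [List.getElem_map, List.getElem_range]
  exact List.getD_eq_getElem xs 0 h2

lemma tr_tr (m : List (List Int)) (hrect : Rect m) (hw : 0 < wid m) : tr (tr m) = m := by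
  apply List.ext_getElem (by rw [length_tr, wid_tr m hw])
  intro j h1 h2
  rw [getElem_tr _ j h1]
  calc (tr m).map (fun row => row.getD j 0)
      = (List.range (wid m)).map (fun k => m[j].getD k 0) := by
        simp only [tr, List.map_map]
        exact List.map_congr_left (fun k hk => by
          simp only [Function.comp]
          exact getD_map_lt m _ j 0 h2)
    _ = m[j] := by
        rw [show wid m = m[j].length from (hrect m[j] (List.getElem_mem h2)).symm]
        exact map_range_getD_self _

-- ---- index normalisation: python index i with -n ≤ i < n becomes (i mod n).toNat ----

lemma modIdx_lt (i : Int) (n : Nat) (h1 : -(n : Int) ≤ i) (h2 : i < n) :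
    (PySem.Int.mod i n).toNat < n := by
  have hn : (0 : Int) < n := by omega
  rw [PySem.Int.mod_eq_emod_of_pos hn]
  have ha := Int.emod_lt_of_pos i hn
  have hb := Int.emod_nonneg i (by omega : (n : Int) ≠ 0)
  omega

lemma modIdx_lt' (i : Int) (n : Nat) (hn : 0 < n) : (PySem.Int.mod i n).toNat < n := by
  have hni : (0 : Int) < n := by exact_mod_cast hn
  rw [PySem.Int.mod_eq_emod_of_pos hni]
  have ha := Int.emod_lt_of_pos i hni
  have hb := Int.emod_nonneg i (by omega : (n : Int) ≠ 0)
  omega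

lemma modIdx_small (i : Int) (n : Nat) (h1 : -(n : Int) ≤ i) (h2 : i < n) :
    ((PySem.Int.mod i n).toNat : Int) = if 0 ≤ i then i else i + n := by
  have hn : (0 : Int) < n := by omega
  rw [PySem.Int.mod_eq_emod_of_pos hn]
  rcases le_or_gt 0 i with h | h
  · rw [if_pos h, Int.emod_eq_of_lt h h2]
    omega
  · rw [if_neg (by omega)]
    have h3 : i % (n : Int) = i + n := by
      calc i % (n : Int) = (i + (n : Int) * 1) % n := (Int.add_mul_emod_self_left i (n : Int) 1).symm
        _ = i + n := by rw [mul_one]; exact Int.emod_eq_of_lt (by omega) (by omega)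
    omega

lemma pyGetD_toMod {α : Type} (xs : List α) (i : Int) (d : α)
    (h1 : -(xs.length : Int) ≤ i) (h2 : i < xs.length) :
    PySem.List.pyGetD xs i d = xs.getD (PySem.Int.mod i xs.length).toNat d := by
  have hk := modIdx_lt i xs.length h1 h2
  have hs := modIdx_small i xs.length h1 h2
  rcases le_or_gt 0 i with h | h
  · rw [PySem.List.pyGetD_eq_getElem xs d h h2, List.getD_eq_getElem xs d hk]
    rw [if_pos h] at hs
    congr 1
    omega
  · have hk1 : 0 < (-i).toNat := by omega
    have hk2 : (-i).toNat ≤ xs.length := by omega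
    have hi : (-(((-i).toNat : Nat) : Int)) = i := by omega
    have hg := PySem.List.pyGetD_neg_natCast xs (-i).toNat d hk1 hk2
    rw [hi] at hg
    rw [hg, List.getD_eq_getElem xs d hk]
    rw [if_neg (by omega)] at hs
    congr 1
    omega

lemma pySetD_toMod {α : Type} (xs : List α) (i : Int) (v : α)
    (h1 : -(xs.length : Int) ≤ i) (h2 : i < xs.length) :
    PySem.List.pySetD xs i v = xs.set (PySem.Int.mod i xs.length).toNat v := by
  have hk := modIdx_lt i xs.length h1 h2
  have hs := modIdx_small i xs.length h1 h2
  simp only [PySem.List.pySetD, PySem.List.pySet?, PySem.List.pyIdx?]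
  rcases le_or_gt 0 i with h | h
  · rw [if_pos h, if_pos h2, Option.map_some, Option.getD_some]
    rw [if_pos h] at hs
    congr 1
    omega
  · rw [if_neg (by omega), if_pos h1, Option.map_some, Option.getD_some]
    rw [if_neg (by omega)] at hs
    congr 1
    omega

-- placeholder to cut: will be replaced

-- ---- row-level and column-level rewriting of both ports' steps ----

lemma headD_eq_getD (m : List (List Int)) : m.headD [] = m.getD 0 [] := by
  cases m <;> simp

lemma rowrevB_eq_set (m : List (List Int)) (k : Nat) (h : k < m.length) :
    rowrevB m k = m.set k ((m.getD k []).reverse) := by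
  rw [rowrevB, List.set_eq_take_cons_drop _ h]
  simp

lemma length_revcolS (m : List (List Int)) (k : Nat) : (revcolS m k).length = m.length := by
  simp [revcolS]

lemma headD_eq_getElem0 {α : Type} (l : List α) (d : α) (h : 0 < l.length) : l.headD d = l[0] := by
  cases l
  · simp at h
  · simp

lemma getElem_revcolS (m : List (List Int)) (k j : Nat) (h : j < (revcolS m k).length) :
    (revcolS m k)[j] = ((m[j]'(by simpa [length_revcolS] using h)).set k
      ((m[m.length - 1 - j]'(by simp [length_revcolS] at h; omega)).getD k 0)) := by
  have hj : j < m.length := by simpa [length_revcolS] using h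
  simp [revcolS, List.getElem_map, List.getElem_zip, List.getElem_reverse]

lemma revcol_eq_spec (m : List (List Int)) (k : Nat) (hrect : Rect m) (hk : k < wid m) :
    revcol m k = revcolS m k := by
  rw [revcol, revcolS]
  apply List.map_congr_left
  intro rv hrv
  have h1 : rv.1 ∈ m := (List.of_mem_zip hrv).1
  have hl : k < rv.1.length := by rw [hrect rv.1 h1]; exact hk
  rw [List.set_eq_take_cons_drop _ hl]
  simp

lemma wid_set_same (m : List (List Int)) (k : Nat) (row : List Int)
    (hlen : row.length = wid m) : wid (m.set k row) = wid m := by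
  cases m with
  | nil => simp
  | cons x xs =>
    cases k with
    | zero => simpa [wid] using hlen
    | succ n => simp [wid]

lemma rect_set (m : List (List Int)) (k : Nat) (row : List Int)
    (hrect : Rect m) (hlen : row.length = wid m) : Rect (m.set k row) := by
  intro r hr
  rw [wid_set_same m k row hlen]
  rcases List.mem_or_eq_of_mem_set hr with h | h
  · exact hrect r h
  · rw [h]; exact hlen

lemma len_getD_of_rect (m : List (List Int)) (k : Nat) (hrect : Rect m) (hk : k < m.length) :
    (m.getD k []).length = wid m := by
  rw [List.getD_eq_getElem _ _ hk]
  exact hrect _ (List.getElem_mem hk)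

lemma rect_revcolS (m : List (List Int)) (k : Nat) (hrect : Rect m) (hk : k < wid m) :
    Rect (revcolS m k) := by
  intro row hrow
  obtain ⟨j, hj, hje⟩ := List.mem_iff_getElem.mp hrow
  rw [getElem_revcolS m k j hj] at hje
  have hj' : j < m.length := by simpa [length_revcolS] using hj
  have hwid : wid (revcolS m k) = wid m := by
    rcases hm : m with _ | ⟨x, xs⟩
    · simp [revcolS, wid]
    · rw [← hm]
      have h0 : 0 < (revcolS m k).length := by rw [length_revcolS, hm]; simp
      have h0m : 0 < m.length := by rw [hm]; simp
      rw [wid, wid, headD_eq_getElem0 _ _ h0, headD_eq_getElem0 _ _ h0m,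
        getElem_revcolS m k 0 h0, List.length_set]
  rw [hwid, ← hje, List.length_set]
  exact hrect _ (List.getElem_mem _)

-- pyRange 0 n 1 over the natural numbers 0..n-1, as a mapped List.range
lemma pyRange_zero_eq (n : Nat) :
    PySem.List.pyRange 0 (n : Int) 1 = (List.range n).map (fun k : Nat => (k : Int)) := by
  rw [PySem.List.pyRange_one]
  simp

lemma aStep_RR (mat : List (List Int)) (op : String) (i : Int)
    (htok : (PySem.Str.split₀ op).getD 0 "" = "RR")
    (hp : PySem.Int.ofStr? ((PySem.Str.split₀ op).getD 1 "") = some i)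
    (h1 : -(mat.length : Int) ≤ i) (h2 : i < mat.length) :
    aStep mat op = mat.set (PySem.Int.mod i mat.length).toNat
      ((mat.getD (PySem.Int.mod i mat.length).toNat []).reverse) := by
  simp only [aStep, htok, hp, if_pos, Option.getD_some, reduceIte]
  rw [pySetD_toMod _ _ _ h1 h2, pyGetD_toMod _ _ _ h1 h2]

lemma aStep_T (mat : List (List Int)) (op : String)
    (h1 : (PySem.Str.split₀ op).getD 0 "" ≠ "RR")
    (h2 : (PySem.Str.split₀ op).getD 0 "" ≠ "RC")
    (hop : op = "T") :
    aStep mat op = tr mat := by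
  subst hop
  simp only [aStep, h1, h2, if_false, ite_true]
  rw [tr]
  have hd : PySem.List.pyGetD mat 0 [] = mat.headD [] := by
    rw [headD_eq_getD]
    simpa using PySem.List.pyGetD_natCast (n := 0) mat []
  rw [hd]
  apply List.ext_getElem (by simp [PySem.List.length_pyRange_one, wid])
  intro i hi1 hi2
  simp only [List.getElem_map, PySem.List.getElem_pyRange_one, List.getElem_range, zero_add]
  apply List.ext_getElem (by simp [PySem.List.length_pyRange_one])
  intro j hj1 hj2
  simp only [List.getElem_map, PySem.List.getElem_pyRange_one, zero_add,
    PySem.List.pyGetD_natCast]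
  have hj : j < mat.length := by simpa using hj2
  simp [List.getD_eq_getElem?_getD, List.getElem?_eq_getElem hj]

lemma wid_revcolS (m : List (List Int)) (k : Nat) : wid (revcolS m k) = wid m := by
  rcases hm : m with _ | ⟨x, xs⟩
  · simp [revcolS, wid]
  · rw [← hm]
    have h0 : 0 < (revcolS m k).length := by rw [length_revcolS, hm]; simp
    have h0m : 0 < m.length := by rw [hm]; simp
    rw [wid, wid, headD_eq_getElem0 _ _ h0, headD_eq_getElem0 _ _ h0m,
      getElem_revcolS m k 0 h0, List.length_set]

lemma getD_set_self (xs : List Int) (k : Nat) (v : Int) (h : k < xs.length) :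
    (xs.set k v).getD k 0 = v := by
  rw [List.getD_eq_getElem _ _ (by simpa using h)]
  exact List.getElem_set_self (by simpa using h)

lemma getD_set_ne (xs : List Int) (k j : Nat) (v : Int) (h : j ≠ k) :
    (xs.set k v).getD j 0 = xs.getD j 0 := by
  simp [List.getD_eq_getElem?_getD, List.getElem?_set_ne (Ne.symm h)]

-- one pass of A's write-back loop  (generic over a prefix already processed)
lemma foldl_setcol : ∀ (suf pre : List (List Int)) (vals : List Int) (i : Int) (c : Nat),
    (∀ row ∈ suf, row.length = c) → vals.length = pre.length + suf.length →
    (-(c : Int) ≤ i) → (i < c) →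
    (List.range' pre.length suf.length).foldl
      (fun acc j => acc.set j (PySem.List.pySetD (acc.getD j []) i (vals.getD j 0))) (pre ++ suf)
    = pre ++ ((suf.zip (vals.drop pre.length)).map
        (fun rv => rv.1.set (PySem.Int.mod i c).toNat rv.2)) := by
  intro suf
  induction suf with
  | nil => intro pre vals i c _ _ _ _; simp
  | cons row suf' ih =>
    intro pre vals i c hrow hv h1 h2
    simp only [List.length_cons]
    rw [List.range'_succ, List.foldl_cons]
    have hg : (pre ++ row :: suf').getD pre.length [] = row := by
      rw [List.getD_eq_getElem _ _ (by simp)]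
      simp
    have hvlt : pre.length < vals.length := by simp at hv; omega
    have hgv : vals.getD pre.length 0 = vals[pre.length] := List.getD_eq_getElem _ _ hvlt
    have hrl : row.length = c := hrow row (by simp)
    have hset : PySem.List.pySetD ((pre ++ row :: suf').getD pre.length [])
        i (vals.getD pre.length 0)
        = row.set (PySem.Int.mod i c).toNat vals[pre.length] := by
      rw [hg, hgv, pySetD_toMod row i _ (by rw [hrl]; exact h1) (by rw [hrl]; exact_mod_cast h2)]
      rw [hrl]
    rw [hset]
    have hsetlist : (pre ++ row :: suf').set pre.length
        (row.set (PySem.Int.mod i c).toNat vals[pre.length])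
        = (pre ++ [row.set (PySem.Int.mod i c).toNat vals[pre.length]]) ++ suf' := by
      simp
    rw [hsetlist]
    have hlen : pre.length + 1 = (pre ++ [row.set (PySem.Int.mod i c).toNat vals[pre.length]]).length := by
      simp
    rw [hlen, ih _ vals i c (fun r hr => hrow r (by simp [hr])) (by simp at hv ⊢; omega) h1 h2]
    have hzip : (row :: suf').zip (List.drop pre.length vals)
        = (row, vals[pre.length]) :: suf'.zip (List.drop (pre.length + 1) vals) := by
      rw [List.drop_eq_getElem_cons hvlt, List.zip_cons_cons]
    rw [hzip, List.map_cons]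
    simp

lemma aStep_RC (mat : List (List Int)) (op : String) (i : Int)
    (hne : (PySem.Str.split₀ op).getD 0 "" ≠ "RR")
    (htok : (PySem.Str.split₀ op).getD 0 "" = "RC")
    (hp : PySem.Int.ofStr? ((PySem.Str.split₀ op).getD 1 "") = some i)
    (hrect : Rect mat)
    (h1 : -(wid mat : Int) ≤ i) (h2 : i < wid mat) :
    aStep mat op = revcolS mat (PySem.Int.mod i (wid mat)).toNat := by
  have hc : 0 < wid mat := by omega
  simp only [aStep, htok, hp, Option.getD_some, String.reduceEq, reduceIte]
  have htab : (PySem.List.pyRange 0 (mat.length : Int) 1).map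
      (fun j => PySem.List.pyGetD (PySem.List.pyGetD mat j []) i 0)
      = mat.map (fun row => row.getD (PySem.Int.mod i (wid mat)).toNat 0) := by
    apply List.ext_getElem (by simp [PySem.List.length_pyRange_one])
    intro j hj1 hj2
    have hjm : j < mat.length := by simpa using hj2
    simp only [List.getElem_map, PySem.List.getElem_pyRange_one, zero_add,
      PySem.List.pyGetD_natCast]
    rw [List.getD_eq_getElem _ _ hjm]
    have hrl : mat[j].length = wid mat := hrect _ (List.getElem_mem hjm)
    rw [pyGetD_toMod mat[j] i 0 (by rw [hrl]; exact h1) (by rw [hrl]; exact_mod_cast h2), hrl]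
  rw [htab]
  set V : List Int := (mat.map (fun row => row.getD (PySem.Int.mod i (wid mat)).toNat 0)).reverse with hV
  have hstep : ((List.range mat.length).map (fun k : Nat => (k : Int))).foldl
      (fun m j => PySem.List.pySetD m j
        (PySem.List.pySetD (PySem.List.pyGetD m j []) i (PySem.List.pyGetD V j 0))) mat
      = (List.range mat.length).foldl
      (fun acc (j : Nat) => acc.set j
        (PySem.List.pySetD (acc.getD j []) i (V.getD j 0))) mat := by
    rw [List.foldl_map]
    have hb : (fun (x : List (List Int)) (y : Nat) => PySem.List.pySetD x ((y : Nat) : Int)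
          (PySem.List.pySetD (PySem.List.pyGetD x ((y : Nat) : Int) []) i (PySem.List.pyGetD V ((y : Nat) : Int) 0)))
        = (fun (acc : List (List Int)) (j : Nat) => acc.set j
          (PySem.List.pySetD (acc.getD j []) i (V.getD j 0))) := by
      funext x y
      simp [PySem.List.pySetD_natCast, PySem.List.pyGetD_natCast]
    rw [hb]
  rw [pyRange_zero_eq mat.length, hstep, List.range_eq_range']
  have hmain := foldl_setcol mat [] V i (wid mat) (fun r hr => hrect r hr)
    (by simp [hV]) h1 (by exact_mod_cast h2)
  simpa [revcolS, hV] using hmain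

lemma aStep_RC_nil (op : String) (i : Int)
    (hne : (PySem.Str.split₀ op).getD 0 "" ≠ "RR")
    (htok : (PySem.Str.split₀ op).getD 0 "" = "RC") :
    aStep [] op = [] := by
  simp only [aStep, htok, String.reduceEq, reduceIte]
  simp

lemma aStep_other (mat : List (List Int)) (op : String)
    (h1 : (PySem.Str.split₀ op).getD 0 "" ≠ "RR")
    (h2 : (PySem.Str.split₀ op).getD 0 "" ≠ "RC")
    (h3 : op ≠ "T") :
    aStep mat op = mat := by
  simp only [aStep]
  rw [if_neg h1, if_neg h2, if_neg h3]

lemma tr_revcolS (m : List (List Int)) (k : Nat) (hrect : Rect m) (hk : k < wid m) :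
    tr (revcolS m k) = (tr m).set k (((tr m).getD k []).reverse) := by
  apply List.ext_getElem (by simp [length_tr, wid_revcolS])
  intro j hj1 hj2
  have hjw : j < wid m := by simpa [length_tr, wid_revcolS] using hj1
  rw [getElem_tr _ j hj1]
  have hkl : k < (tr m).length := by simpa [length_tr] using hk
  by_cases hjk : j = k
  · subst hjk
    rw [List.getElem_set_self (by simpa [List.length_set] using hj2)]
    rw [List.getD_eq_getElem _ _ hkl, getElem_tr m j hkl]
    apply List.ext_getElem (by simp [length_revcolS])
    intro l hl1 hl2
    have hlm : l < m.length := by simpa [length_revcolS] using hl1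
    simp only [List.getElem_map, List.getElem_reverse, List.length_map]
    rw [getElem_revcolS m j l (by simpa [length_revcolS] using hlm)]
    have hrl : j < m[l].length := by rw [hrect _ (List.getElem_mem hlm)]; exact hjw
    rw [getD_set_self _ _ _ hrl]
  · rw [List.getElem_set_ne (Ne.symm hjk) (by simpa [List.length_set] using hj2)]
    rw [getElem_tr m j (by simpa [length_tr] using hjw)]
    apply List.ext_getElem (by simp [length_revcolS])
    intro l hl1 hl2
    have hlm : l < m.length := by simpa [length_revcolS] using hl1
    simp only [List.getElem_map]
    rw [getElem_revcolS m k l (by simpa [length_revcolS] using hlm)]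
    exact getD_set_ne _ _ _ _ hjk

lemma tr_rowrev (m : List (List Int)) (k : Nat) (hrect : Rect m) (hk : k < m.length) :
    tr (m.set k ((m.getD k []).reverse)) = revcolS (tr m) k := by
  have hwid : wid (m.set k ((m.getD k []).reverse)) = wid m := by
    apply wid_set_same
    rw [List.length_reverse]
    exact len_getD_of_rect m k hrect hk
  apply List.ext_getElem (by rw [length_tr, length_revcolS, length_tr]; exact hwid)
  intro j hj1 hj2
  have hjw : j < wid m := by rw [length_tr, hwid] at hj1; exact hj1
  rw [getElem_tr _ j hj1]
  rw [getElem_revcolS (tr m) k j (by simpa [length_revcolS, length_tr] using hjw)]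
  rw [List.map_set]
  have hgk : m.getD k [] = m[k] := List.getD_eq_getElem _ _ hk
  have hkw : m[k].length = wid m := hrect _ (List.getElem_mem hk)
  congr 1
  · rw [getElem_tr m j (by simpa [length_tr] using hjw)]
  · -- the written value
    rw [hgk]
    have hrev : (m[k].reverse).getD j 0 = m[k].getD (wid m - 1 - j) 0 := by
      have hb1 : j < m[k].reverse.length := by rw [List.length_reverse, hkw]; exact hjw
      have hb2 : wid m - 1 - j < m[k].length := by omega
      rw [List.getD_eq_getElem _ _ hb1, List.getElem_reverse, List.getD_eq_getElem _ _ hb2]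
      congr 1
      omega
    rw [hrev]
    have hlen : (tr m).length - 1 - j < (tr m).length := by
      rw [length_tr]; omega
    rw [getElem_tr m _ hlen, getD_map_lt m _ k 0 hk, length_tr]

-- ---- zip(*m) is the transpose on rectangular matrices ----

lemma headD_getD {α : Type} (l : List α) (d : α) : l.headD d = l.getD 0 d := by
  cases l <;> simp

lemma zipStar_eq_tr : ∀ (w : Nat) (m : List (List Int)), Rect m → wid m = w → zipStar m = tr m := by
  intro w
  induction w with
  | zero =>
    intro m hrect hw
    rw [zipStar, (tr_eq_nil_iff m).2 hw]
    cases m with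
    | nil => simp
    | cons x xs =>
      have hx : x = [] := by
        have := hrect x (by simp)
        rw [hw] at this
        exact List.eq_nil_iff_length_eq_zero.mpr this
      simp [hx]
  | succ n ih =>
    intro m hrect hw
    have hne : ∀ row ∈ m, row ≠ [] := by
      intro row hrow hnil
      have := hrect row hrow
      rw [hw, hnil] at this
      simp at this
    have hcond : (m.isEmpty || m.any (fun r => r.isEmpty)) = false := by
      cases m with
      | nil => simp [wid] at hw
      | cons x xs =>
        simp only [List.isEmpty_cons, Bool.false_or, List.any_eq_false]
        intro r hr
        simpa using hne r hr
    rw [zipStar, hcond, if_neg (by simp)]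
    have hrect' : Rect (m.map (fun r => r.tail)) := by
      intro row hrow
      obtain ⟨r0, hr0, hr0e⟩ := List.mem_map.mp hrow
      have hwid' : wid (m.map (fun r => r.tail)) = n := by
        cases m with
        | nil => simp [wid] at hw
        | cons x xs =>
          have hx := hrect x (by simp)
          rw [hw] at hx
          simp [wid, hx]
      rw [hwid', ← hr0e]
      have := hrect r0 hr0
      rw [hw] at this
      simp [this]
    have hwid' : wid (m.map (fun r => r.tail)) = n := by
      cases m with
      | nil => simp [wid] at hw
      | cons x xs =>
        have hx := hrect x (by simp)
        rw [hw] at hx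
        simp [wid, hx]
    rw [ih (m.map (fun r => r.tail)) hrect' hwid']
    -- tr m = heads :: tr (tails)
    rw [tr, tr, hw, hwid', List.range_succ_eq_map, List.map_cons, List.map_map]
    congr 1
    · apply List.map_congr_left
      intro row hrow
      rw [headD_getD]
    · apply List.map_congr_left
      intro j _
      simp only [Function.comp, List.map_map]
      apply List.map_congr_left
      intro row _
      simp

-- ---- the two renderings agree ----

lemma join_empty_cons (s : String) (l : List String) :
    PySem.Str.join "" (s :: l) = s ++ PySem.Str.join "" l := by
  apply String.toList_inj.mp
  rw [String.toList_append]
  simp only [PySem.Str.join, String.toList_ofList, List.map_cons]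
  cases l with
  | nil => simp [PySem.Chars.join_singleton, PySem.Chars.join_nil]
  | cons b l' =>
    rw [List.map_cons, PySem.Chars.join_cons_cons]
    simp

lemma join_empty_nil : PySem.Str.join "" ([] : List String) = "" := by
  apply String.toList_inj.mp
  simp [PySem.Str.join, PySem.Chars.join_nil]

lemma render_inner (xs : List Int) : ∀ (r : String),
    xs.foldl (fun r x => r ++ PySem.Int.toStr x ++ " ") r
    = r ++ PySem.Str.join "" (xs.map (fun x => PySem.Int.toStr x ++ " ")) := by
  induction xs with
  | nil => intro r; simp [join_empty_nil]
  | cons x xs ih =>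
    intro r
    rw [List.foldl_cons, List.map_cons, join_empty_cons, ih]
    simp [String.append_assoc]

lemma render_outer (m : List (List Int)) : ∀ (r : String),
    m.foldl (fun ret row => (row.foldl (fun r x => r ++ PySem.Int.toStr x ++ " ") ret) ++ "\n") r
    = r ++ PySem.Str.join "" (m.map (fun row =>
        PySem.Str.join "" (row.map (fun x => PySem.Int.toStr x ++ " ")) ++ "\n")) := by
  induction m with
  | nil => intro r; simp [join_empty_nil]
  | cons row rows ih =>
    intro r
    rw [List.foldl_cons, List.map_cons, join_empty_cons, ih, render_inner]
    simp [String.append_assoc]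

lemma render_eq (m : List (List Int)) :
    m.foldl (fun ret row => (row.foldl (fun r x => r ++ PySem.Int.toStr x ++ " ") ret) ++ "\n") ""
    = PySem.Str.join "" (m.map (fun row =>
        PySem.Str.join "" (row.map (fun x => PySem.Int.toStr x ++ " ")) ++ "\n")) := by
  rw [render_outer, String.empty_append]

-- ---- destructuring the per-operation precondition ----

lemma T_head : (PySem.Str.split₀ "T").getD 0 "" = "T" := by decide

lemma preOp_RR (op : String) (r c : Nat)
    (htok : (PySem.Str.split₀ op).getD 0 "" = "RR") (h : preOp op r c = true) :
    ∃ i, PySem.Int.ofStr? ((PySem.Str.split₀ op).getD 1 "") = some i ∧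
      -(r : Int) ≤ i ∧ i < (r : Int) := by
  simp only [preOp, htok, String.reduceEq, reduceIte, Bool.and_eq_true] at h
  rcases hp : PySem.Int.ofStr? ((PySem.Str.split₀ op).getD 1 "") with _ | i
  · rw [hp] at h; simp at h
  · rw [hp] at h
    simp only [decide_eq_true_eq] at h
    exact ⟨i, rfl, h.2.1, h.2.2⟩

lemma preOp_RC (op : String) (r c : Nat)
    (htok : (PySem.Str.split₀ op).getD 0 "" = "RC") (h : preOp op r c = true) :
    ∃ i, PySem.Int.ofStr? ((PySem.Str.split₀ op).getD 1 "") = some i ∧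
      (r = 0 ∨ (-(c : Int) ≤ i ∧ i < (c : Int))) := by
  have hne : (PySem.Str.split₀ op).getD 0 "" ≠ "RR" := by rw [htok]; decide
  simp only [preOp, htok, String.reduceEq, reduceIte, Bool.and_eq_true] at h
  rcases hp : PySem.Int.ofStr? ((PySem.Str.split₀ op).getD 1 "") with _ | i
  · rw [hp] at h; simp at h
  · rw [hp] at h
    simp only [Bool.or_eq_true, beq_iff_eq, decide_eq_true_eq] at h
    exact ⟨i, rfl, h.2⟩

lemma preOp_T (op : String) (r c : Nat) (hop : op = "T") (h : preOp op r c = true) :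
    0 < r := by
  subst hop
  simp only [preOp, T_head, String.reduceEq, reduceIte, Bool.and_eq_true, decide_eq_true_eq] at h
  exact h.2

-- ---- unfolding B's step in each case ----

lemma bStep_RR (m : List (List Int)) (t : Bool) (op : String) (i : Int)
    (htok : (PySem.Str.split₀ op).getD 0 "" = "RR")
    (hp : PySem.Int.ofStr? ((PySem.Str.split₀ op).getD 1 "") = some i) :
    bStep (m, t) op = if t then (revcol m (PySem.Int.mod i (wid m)).toNat, t)
      else (rowrevB m (PySem.Int.mod i m.length).toNat, t) := by
  simp only [bStep, htok, hp, Option.getD_some, String.reduceEq, reduceIte]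
  rfl

lemma bStep_RC (m : List (List Int)) (t : Bool) (op : String) (i : Int)
    (htok : (PySem.Str.split₀ op).getD 0 "" = "RC")
    (hp : PySem.Int.ofStr? ((PySem.Str.split₀ op).getD 1 "") = some i) :
    bStep (m, t) op = if m.isEmpty then (m, t)
      else if t then (rowrevB m (PySem.Int.mod i m.length).toNat, t)
      else (revcol m (PySem.Int.mod i (wid m)).toNat, t) := by
  simp only [bStep, htok, hp, Option.getD_some, String.reduceEq, reduceIte]
  rfl

lemma bStep_T (m : List (List Int)) (t : Bool) (op : String)
    (h1 : (PySem.Str.split₀ op).getD 0 "" ≠ "RR")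
    (h2 : (PySem.Str.split₀ op).getD 0 "" ≠ "RC")
    (hop : op = "T") :
    bStep (m, t) op = (m, !t) := by
  simp only [bStep]
  rw [if_neg h1, if_neg h2, if_pos hop]

lemma bStep_other (m : List (List Int)) (t : Bool) (op : String)
    (h1 : (PySem.Str.split₀ op).getD 0 "" ≠ "RR")
    (h2 : (PySem.Str.split₀ op).getD 0 "" ≠ "RC")
    (h3 : op ≠ "T") :
    bStep (m, t) op = (m, t) := by
  simp only [bStep]
  rw [if_neg h1, if_neg h2, if_neg h3]


lemma isRect_Rect (m : List (List Int)) (h : isRect m = true) : Rect m := by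
  intro row hrow
  simp only [isRect, List.all_eq_true, beq_iff_eq] at h
  rw [wid]
  exact h row hrow

-- the joint loop invariant: B's state (m, t) represents A's matrix as (if t then tr m else m)
lemma loop_struct : ∀ (ops : List String) (m : List (List Int)) (t : Bool) (a : List (List Int)) (r c : Nat),
    Rect m → a = (if t then tr m else m) →
    r = a.length → (0 < r → c = wid a) →
    preOps ops r c = true →
    Rect (ops.foldl bStep (m, t)).1 ∧
    ops.foldl aStep a = (if (ops.foldl bStep (m, t)).2 then tr (ops.foldl bStep (m, t)).1 else (ops.foldl bStep (m, t)).1) := by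
  intro ops
  induction ops with
  | nil =>
    intro m t a r c hrect hrel hr hc hpre
    exact ⟨by simpa using hrect, by simpa using hrel⟩
  | cons op rest ih =>
    intro m t a r c hrect hrel hr hc hpre
    simp only [preOps, Bool.and_eq_true] at hpre
    obtain ⟨hop, hrest⟩ := hpre
    rw [List.foldl_cons, List.foldl_cons]
    by_cases hRR : (PySem.Str.split₀ op).getD 0 "" = "RR"
    · -- row reversal
      obtain ⟨i, hp, hb1, hb2⟩ := preOp_RR op r c hRR hop
      have hopT : op ≠ "T" := by
        intro h; rw [h, T_head] at hRR; exact absurd hRR (by decide)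
      rw [if_neg hopT] at hrest
      have hr0 : 0 < r := by omega
      cases t with
      | false =>
        simp only [if_neg Bool.false_ne_true] at hrel
        subst hrel
        rw [hr] at hb1 hb2
        have hk : (PySem.Int.mod i a.length).toNat < a.length := modIdx_lt i a.length hb1 hb2
        rw [bStep_RR a false op i hRR hp, if_neg Bool.false_ne_true]
        rw [aStep_RR a op i hRR hp hb1 hb2, rowrevB_eq_set a _ hk]
        apply ih _ false _ r c
        · exact rect_set a _ _ hrect (by rw [List.length_reverse]; exact len_getD_of_rect a _ hrect hk)
        · simp
        · rw [List.length_set]; exact hr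
        · intro h
          rw [wid_set_same a _ _ (by rw [List.length_reverse]; exact len_getD_of_rect a _ hrect hk)]
          exact hc h
        · exact hrest
      | true =>
        simp only [if_pos] at hrel
        subst hrel
        rw [hr] at hb1 hb2
        rw [length_tr] at hb1 hb2
        have hkw : (PySem.Int.mod i (wid m)).toNat < wid m := modIdx_lt i (wid m) hb1 hb2
        have hw0 : 0 < wid m := by omega
        rw [bStep_RR m true op i hRR hp, if_pos rfl]
        have hA := aStep_RR (tr m) op i hRR hp (by rw [length_tr]; exact hb1) (by rw [length_tr]; exact hb2)
        rw [length_tr] at hA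
        rw [hA, revcol_eq_spec m _ hrect hkw, ← tr_revcolS m _ hrect hkw]
        apply ih _ true _ r c
        · exact rect_revcolS m _ hrect hkw
        · simp
        · rw [length_tr, wid_revcolS, hr, length_tr]
        · intro h
          have h1 : wid (tr (revcolS m (PySem.Int.mod i (wid m)).toNat)) = (revcolS m (PySem.Int.mod i (wid m)).toNat).length := by
            apply wid_tr
            rw [wid_revcolS]
            exact hw0
          rw [h1, length_revcolS, hc hr0, wid_tr m hw0]
        · exact hrest
    · by_cases hRC : (PySem.Str.split₀ op).getD 0 "" = "RC"
      · -- column reversal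
        obtain ⟨i, hp, hb⟩ := preOp_RC op r c hRC hop
        have hopT : op ≠ "T" := by
          intro h; rw [h, T_head] at hRC; exact absurd hRC (by decide)
        rw [if_neg hopT] at hrest
        rcases Nat.eq_zero_or_pos r with hr0 | hrpos
        · -- logical matrix has no rows: both sides do nothing
          subst hr0
          cases t with
          | false =>
            simp only [if_neg Bool.false_ne_true] at hrel
            subst hrel
            have ha : a = [] := List.eq_nil_iff_length_eq_zero.mpr hr.symm
            subst ha
            rw [bStep_RC [] false op i hRC hp, if_pos (by simp)]
            rw [aStep_RC_nil op i hRR hRC]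
            exact ih [] false [] 0 c hrect (by simp) (by simp) (by omega) hrest
          | true =>
            simp only [if_pos] at hrel
            subst hrel
            have hw0 : wid m = 0 := by
              have := hr.symm
              rw [length_tr] at this
              exact this
            have hA := aStep_RC_nil op i hRR hRC
            have htrm : tr m = [] := (tr_eq_nil_iff m).2 hw0
            rw [htrm, hA]
            rw [bStep_RC m true op i hRC hp]
            by_cases hme : m.isEmpty
            · rw [if_pos hme]
              have := ih m true (tr m) 0 c hrect rfl (by rw [length_tr, hw0]) (by omega) hrest
              rw [htrm] at this
              exact this
            · rw [if_neg hme, if_pos rfl]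
              have hml : 0 < m.length := by
                cases m with
                | nil => simp at hme
                | cons x xs => simp
              have hk : (PySem.Int.mod i m.length).toNat < m.length := modIdx_lt' i m.length hml
              have hrow : m.getD (PySem.Int.mod i m.length).toNat [] = [] := by
                have := len_getD_of_rect m _ hrect hk
                rw [hw0] at this
                exact List.eq_nil_iff_length_eq_zero.mpr this
              have hmm : rowrevB m (PySem.Int.mod i m.length).toNat = m := by
                rw [rowrevB_eq_set m _ hk, hrow]
                simp only [List.reverse_nil]
                rw [List.getD_eq_getElem _ _ hk] at hrow
                rw [← hrow]
                exact List.set_getElem_self hk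
              rw [hmm]
              have := ih m true (tr m) 0 c hrect rfl (by rw [length_tr, hw0]) (by omega) hrest
              rw [htrm] at this
              exact this
        · -- in-range column reversal
          obtain ⟨hb1, hb2⟩ := hb.resolve_left (by omega)
          cases t with
          | false =>
            simp only [if_neg Bool.false_ne_true] at hrel
            subst hrel
            have hcw : c = wid a := hc hrpos
            rw [hcw] at hb1 hb2
            have hkw : (PySem.Int.mod i (wid a)).toNat < wid a := modIdx_lt _ _ hb1 hb2
            have hml : 0 < a.length := by omega
            have hme : a.isEmpty = false := by
              cases a with
              | nil => simp at hml
              | cons x xs => simp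
            rw [bStep_RC a false op i hRC hp, if_neg (by simp [hme]), if_neg Bool.false_ne_true]
            rw [aStep_RC a op i hRR hRC hp hrect hb1 hb2]
            rw [revcol_eq_spec a _ hrect hkw]
            apply ih _ false _ r c
            · exact rect_revcolS a _ hrect hkw
            · simp
            · rw [length_revcolS]; exact hr
            · intro _
              rw [wid_revcolS]
              exact hcw
            · exact hrest
          | true =>
            simp only [if_pos] at hrel
            subst hrel
            have hw0 : 0 < wid m := by rw [hr, length_tr] at hrpos; exact hrpos
            have hcw : c = m.length := by rw [hc hrpos, wid_tr m hw0]
            rw [hcw] at hb1 hb2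
            have hk : (PySem.Int.mod i m.length).toNat < m.length := modIdx_lt _ _ hb1 hb2
            have hml : 0 < m.length := by omega
            have hme : m.isEmpty = false := by
              cases m with
              | nil => simp at hml
              | cons x xs => simp
            rw [bStep_RC m true op i hRC hp, if_neg (by simp [hme]), if_pos rfl]
            have hsetlen : ((m.getD (PySem.Int.mod i m.length).toNat []).reverse).length = wid m := by
              rw [List.length_reverse]
              exact len_getD_of_rect m _ hrect hk
            have hA := aStep_RC (tr m) op i hRR hRC hp (rect_tr m)
              (by rw [wid_tr m hw0]; exact hb1) (by rw [wid_tr m hw0]; exact hb2)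
            rw [wid_tr m hw0] at hA
            rw [hA, rowrevB_eq_set m _ hk, ← tr_rowrev m _ hrect hk]
            apply ih _ true _ r c
            · exact rect_set m _ _ hrect hsetlen
            · simp
            · rw [length_tr, wid_set_same m _ _ hsetlen, hr, length_tr]
            · intro _
              rw [wid_tr _ (by rw [wid_set_same m _ _ hsetlen]; exact hw0), List.length_set]
              exact hcw
            · exact hrest
      · by_cases hT : op = "T"
        · have hr0 : 0 < r := preOp_T op r c hT hop
          rw [if_pos hT] at hrest
          cases t with
          | false =>
            simp only [if_neg Bool.false_ne_true] at hrel
            subst hrel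
            rw [bStep_T a false op hRR hRC hT, aStep_T a op hRR hRC hT]
            apply ih _ true _ c r
            · exact hrect
            · simp
            · rw [length_tr]
              exact hc hr0
            · intro hcpos
              rw [wid_tr a (by rw [← hc hr0]; exact hcpos), hr]
            · exact hrest
          | true =>
            simp only [if_pos] at hrel
            subst hrel
            have hw0 : 0 < wid m := by
              rw [hr, length_tr] at hr0
              exact hr0
            rw [bStep_T m true op hRR hRC hT, aStep_T (tr m) op hRR hRC hT, tr_tr m hrect hw0]
            apply ih _ false _ c r
            · exact hrect
            · simp
            · rw [hc hr0, wid_tr m hw0]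
            · intro _
              rw [hr, length_tr]
            · exact hrest
        · -- no-op
          rw [if_neg hT] at hrest
          rw [bStep_other m t op hRR hRC hT, aStep_other a op hRR hRC hT]
          exact ih m t a r c hrect hrel hr hc hrest

-- without column/transpose operations no rectangularity is needed: B's flag stays false
lemma loop_nostruct : ∀ (ops : List String) (a : List (List Int)) (r : Nat),
    a.length = r →
    (∀ op ∈ ops, ((PySem.Str.split₀ op).getD 0 "" ≠ "RC") ∧ op ≠ "T") →
    (∀ op ∈ ops, preOp op r 0 = true) →
    ops.foldl bStep (a, false) = (ops.foldl aStep a, false) ∧ (ops.foldl aStep a).length = r := by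
  intro ops
  induction ops with
  | nil => intro a r hlen _ _; exact ⟨rfl, hlen⟩
  | cons op rest ih =>
    intro a r hlen hst hpre
    obtain ⟨hne1, hne2⟩ := hst op (by simp)
    have hp := hpre op (by simp)
    rw [List.foldl_cons, List.foldl_cons]
    by_cases hRR : (PySem.Str.split₀ op).getD 0 "" = "RR"
    · obtain ⟨i, hpi, hb1, hb2⟩ := preOp_RR op r 0 hRR hp
      rw [← hlen] at hb1 hb2
      have hk := modIdx_lt i a.length hb1 hb2
      rw [bStep_RR a false op i hRR hpi, if_neg Bool.false_ne_true,
        aStep_RR a op i hRR hpi hb1 hb2, rowrevB_eq_set a _ hk]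
      exact ih _ r (by rw [List.length_set]; exact hlen)
        (fun o ho => hst o (by simp [ho])) (fun o ho => hpre o (by simp [ho]))
    · rw [bStep_other a false op hRR hne1 hne2, aStep_other a op hRR hne1 hne2]
      exact ih a r hlen (fun o ho => hst o (by simp [ho])) (fun o ho => hpre o (by simp [ho]))

-- ===== VERDICT (by name: the statement is the Claim_ definition above) =====
theorem transform_spec : Claim_equal_transform := by
  intro mat ops _ hpre
  unfold Spec_transform
  rw [Pre_transform] at hpre
  simp only [transform, transform_alt]
  by_cases hs : hasStruct ops = true
  · rw [if_pos hs, Bool.and_eq_true] at hpre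
    obtain ⟨hrectb, hopsb⟩ := hpre
    have hrect := isRect_Rect mat hrectb
    obtain ⟨hR, hrel⟩ := loop_struct ops mat false mat mat.length (wid mat)
      hrect (by simp) rfl (fun _ => rfl) hopsb
    rw [render_eq, hrel]
    cases hst : (ops.foldl bStep (mat, false)).2
    · simp
    · rw [zipStar_eq_tr (wid (ops.foldl bStep (mat, false)).1) _ hR rfl]
  · rw [if_neg hs] at hpre
    have hb : hasStruct ops = false := by
      revert hs; cases hasStruct ops <;> simp
    have hstr : ∀ op ∈ ops, ((PySem.Str.split₀ op).getD 0 "" ≠ "RC") ∧ op ≠ "T" := by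
      intro op hop
      simp only [hasStruct, List.any_eq_false] at hb
      have := hb op hop
      simp only [Bool.or_eq_true, beq_iff_eq, not_or] at this
      exact this
    have hpre' : ∀ op ∈ ops, preOp op mat.length 0 = true := by
      rw [List.all_eq_true] at hpre
      exact fun op hop => hpre op hop
    obtain ⟨hBfold, _⟩ := loop_nostruct ops mat mat.length rfl hstr hpre'
    rw [render_eq, hBfold]
    simp
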